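-- pv_equiv track=rewrite | github.com/Scarred95/FATCHAD | backend/events/seed.py | strip_jsonc_comments
-- ===== SOURCE A (Python) =====
-- def strip_jsonc_comments(text: str) -> str:
--     """Remove // line comments and /* */ block comments while leaving string
--     literals untouched. Tolerates the kind of inline notes the card authors
--     leave in *.json / *.jsonc card files.
--     """
--     out: list[str] = []
--     i, n = 0, len(text)
--     in_str = False
--     str_quote = ""
--     while i < n:
--         ch = text[i]
--         if in_str:
--             out.append(ch)
--             if ch == "\\" and i + 1 < n:
--                 out.append(text[i + 1])
--                 i += 2
--                 continue
--             if ch == str_quote: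
--                 in_str = False
--             i += 1
--             continue
--         if ch in ('"', "'"):
--             in_str = True
--             str_quote = ch
--             out.append(ch)
--             i += 1
--             continue
--         if ch == "/" and i + 1 < n and text[i + 1] == "/":
--             i += 2
--             while i < n and text[i] != "\n":
--                 i += 1
--             continue
--         if ch == "/" and i + 1 < n and text[i + 1] == "*":
--             i += 2
--             while i + 1 < n and not (text[i] == "*" and text[i + 1] == "/"):
--                 i += 1
--             i += 2
--             continue
--         out.append(ch)
--         i += 1
--     return "".join(out)
-- ===== SOURCE B (Python) =====
-- def strip_jsonc_comments(text: str) -> str: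
--     """FSM rewrite: one state variable, one pass, no index arithmetic or lookahead."""
--     NORMAL, IN_STR, ESC, SLASH, LINE, BLOCK, BLOCK_STAR = range(7)
--     mode = NORMAL
--     quote = ""
--     out = []
--     for ch in text:
--         if mode == NORMAL:
--             if ch in ('"', "'"):
--                 mode, quote = IN_STR, ch
--                 out.append(ch)
--             elif ch == "/":
--                 mode = SLASH
--             else:
--                 out.append(ch)
--         elif mode == IN_STR:
--             out.append(ch)
--             if ch == "\\":
--                 mode = ESC
--             elif ch == quote:
--                 mode = NORMAL
--         elif mode == ESC:
--             out.append(ch)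
--             mode = IN_STR
--         elif mode == SLASH:
--             if ch == "/":
--                 mode = LINE
--             elif ch == "*":
--                 mode = BLOCK
--             elif ch in ('"', "'"):
--                 out.append("/")
--                 out.append(ch)
--                 mode, quote = IN_STR, ch
--             else:
--                 out.append("/")
--                 out.append(ch)
--                 mode = NORMAL
--         elif mode == LINE:
--             if ch == "\n":
--                 out.append(ch)
--                 mode = NORMAL
--         elif mode == BLOCK:
--             if ch == "*":
--                 mode = BLOCK_STAR
--         else:  # BLOCK_STAR
--             if ch == "/":
--                 mode = NORMAL
--             elif ch != "*":
--                 mode = BLOCK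
--     if mode == SLASH:
--         out.append("/")
--     return "".join(out)
-- ===== Notes on version B (the rewrite author's own statement) =====
-- stated objective: faster
-- what changed: Replaces A's index-based scanner with lookahead and nested skip-ahead while loops by a single-pass 7-state finite-state machine (NORMAL/IN_STRING/ESCAPE/SAW_SLASH/LINE/BLOCK/BLOCK_STAR) consuming one character at a time, flushing a pending slash at EOF; avoiding per-character indexing/lookahead gives a constant-factor speedup.
import Mathlib
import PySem

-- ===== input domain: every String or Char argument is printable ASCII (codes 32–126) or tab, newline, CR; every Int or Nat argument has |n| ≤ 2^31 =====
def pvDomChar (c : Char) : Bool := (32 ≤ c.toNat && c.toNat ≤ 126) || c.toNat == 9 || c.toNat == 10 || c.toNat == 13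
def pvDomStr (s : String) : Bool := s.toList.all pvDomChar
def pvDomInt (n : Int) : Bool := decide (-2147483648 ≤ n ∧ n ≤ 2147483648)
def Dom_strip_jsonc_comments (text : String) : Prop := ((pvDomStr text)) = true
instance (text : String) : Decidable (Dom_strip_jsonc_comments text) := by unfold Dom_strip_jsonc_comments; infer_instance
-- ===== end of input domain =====

-- B rewrites A's index-based scanner with lookahead/inner skip loops as a single-pass
-- 7-state finite-state machine over the characters (objective: idiomatic decomposition).

-- ===== PORT A =====
-- inner `while i < n and text[i] != "\n"` loop: returns the suffix starting at the '\n' (or [])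
def stripA_skipLine : List Char → List Char
  | [] => []
  | c :: r => if c = '\n' then c :: r else stripA_skipLine r

-- inner `while i + 1 < n and not (text[i] == "*" and text[i+1] == "/")` loop followed by `i += 2`
def stripA_skipBlock : List Char → List Char
  | [] => []
  | [_] => []
  | a :: b :: r => if a = '*' ∧ b = '/' then r else stripA_skipBlock (b :: r)

theorem stripA_skipLine_length_le (l : List Char) : (stripA_skipLine l).length ≤ l.length := by
  induction l with
  | nil => simp [stripA_skipLine]
  | cons c r ih =>
    simp only [stripA_skipLine]
    split
    · simp
    · exact Nat.le_trans ih (Nat.le_succ _)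

theorem stripA_skipBlock_length_le (l : List Char) : (stripA_skipBlock l).length ≤ l.length := by
  induction l using stripA_skipBlock.induct with
  | case1 => simp [stripA_skipBlock]
  | case2 => simp [stripA_skipBlock]
  | case3 a b r h =>
    have e : stripA_skipBlock (a :: b :: r) = r := by simp [stripA_skipBlock, h]
    rw [e]; simp; omega
  | case4 a b r h ih =>
    have e : stripA_skipBlock (a :: b :: r) = stripA_skipBlock (b :: r) := by
      simp [stripA_skipBlock, h]
    rw [e]; exact Nat.le_trans ih (by simp)

-- A's main `while i < n` loop, as structural recursion on the remaining suffix,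
-- with the same state (in_str, str_quote); branches in A's order.
def stripA_loop : List Char → Bool → Char → List Char
  | [], _, _ => []
  | ch :: rest, true, q =>
      if ch = '\\' ∧ rest ≠ [] then ch :: rest.headI :: stripA_loop rest.tail true q
      else if ch = q then ch :: stripA_loop rest false q
      else ch :: stripA_loop rest true q
  | ch :: rest, false, q =>
      if ch = '"' ∨ ch = '\'' then ch :: stripA_loop rest true ch
      else if ch = '/' ∧ rest.head? = some '/' then stripA_loop (stripA_skipLine rest.tail) false q
      else if ch = '/' ∧ rest.head? = some '*' then stripA_loop (stripA_skipBlock rest.tail) false q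
      else ch :: stripA_loop rest false q
termination_by l _ _ => l.length
decreasing_by
  all_goals first
  | (cases rest <;> simp [List.tail] <;> omega)
  | exact Nat.lt_succ_of_le (Nat.le_trans (stripA_skipLine_length_le _) (by cases rest <;> simp [List.tail]))
  | exact Nat.lt_succ_of_le (Nat.le_trans (stripA_skipBlock_length_le _) (by cases rest <;> simp [List.tail]))

def strip_jsonc_comments (text : String) : String :=
  String.mk (stripA_loop text.toList false ' ')   -- initial str_quote "" is never read while in_str is false

-- ===== PORT B =====
inductive StB where
  | normal | inStr (q : Char) | esc (q : Char) | slash | line | block | blockStar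
deriving DecidableEq, Repr

def stepB (s : StB) (c : Char) : StB × List Char :=
  match s with
  | .normal =>
      if c = '"' ∨ c = '\'' then (.inStr c, [c])
      else if c = '/' then (.slash, [])
      else (.normal, [c])
  | .inStr q =>
      if c = '\\' then (.esc q, [c])
      else if c = q then (.normal, [c])
      else (.inStr q, [c])
  | .esc q => (.inStr q, [c])
  | .slash =>
      if c = '/' then (.line, [])
      else if c = '*' then (.block, [])
      else if c = '"' ∨ c = '\'' then (.inStr c, ['/', c])
      else (.normal, ['/', c])
  | .line => if c = '\n' then (.normal, [c]) else (.line, [])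
  | .block => if c = '*' then (.blockStar, []) else (.block, [])
  | .blockStar =>
      if c = '/' then (.normal, [])
      else if c = '*' then (.blockStar, [])
      else (.block, [])

def flushB (s : StB) : List Char := if s = .slash then ['/'] else []

def strip_jsonc_comments_alt (text : String) : String :=
  let p := text.toList.foldl (fun p c => ((stepB p.1 c).1, p.2 ++ (stepB p.1 c).2)) (StB.normal, [])
  String.mk (p.2 ++ flushB p.1)

-- ===== PRECONDITION & SPEC =====
def Spec_strip_jsonc_comments (text : String) (out : String) : Prop := out = strip_jsonc_comments_alt text
instance (text : String) (out : String) : Decidable (Spec_strip_jsonc_comments text out) := by unfold Spec_strip_jsonc_comments; infer_instance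

-- ===== CLAIM (what is proved, stated in full; the proofs are below) =====
def Claim_equal_strip_jsonc_comments : Prop := ∀ (text : String), Dom_strip_jsonc_comments text → Spec_strip_jsonc_comments text (strip_jsonc_comments text)

-- ===== LEMMAS AND PROOFS =====

-- B's machine run recursively from a given state (foldl unrolled), plus the final flush
def runB : StB → List Char → List Char
  | s, [] => flushB s
  | s, c :: r => (stepB s c).2 ++ runB (stepB s c).1 r

theorem foldl_runB (l : List Char) : ∀ (s : StB) (acc : List Char),
    (l.foldl (fun p c => ((stepB p.1 c).1, p.2 ++ (stepB p.1 c).2)) (s, acc)).2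
      ++ flushB (l.foldl (fun p c => ((stepB p.1 c).1, p.2 ++ (stepB p.1 c).2)) (s, acc)).1
    = acc ++ runB s l := by
  induction l with
  | nil => intro s acc; simp [runB]
  | cons c r ih => intro s acc; simp [List.foldl, runB, ih, List.append_assoc]

theorem runB_line (r : List Char) : runB .line r = runB .normal (stripA_skipLine r) := by
  induction r with
  | nil => simp [runB, stripA_skipLine, flushB]
  | cons c r ih =>
    by_cases h : c = '\n'
    · subst h; simp [runB, stripA_skipLine, stepB]
    · simp [runB, stripA_skipLine, stepB, h, ih]

theorem runB_blockStar (b : Char) (r : List Char) (h : b ≠ '/') :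
    runB .blockStar (b :: r) = runB .block (b :: r) := by
  by_cases hb : b = '*' <;> simp [runB, stepB, h, hb]

theorem runB_block (r : List Char) : runB .block r = runB .normal (stripA_skipBlock r) := by
  induction r with
  | nil => simp [runB, stripA_skipBlock, flushB]
  | cons a t ih =>
    cases t with
    | nil => by_cases ha : a = '*' <;> simp [runB, stepB, stripA_skipBlock, flushB, ha]
    | cons b r =>
      by_cases hab : a = '*' ∧ b = '/'
      · obtain ⟨ha, hb⟩ := hab
        subst ha; subst hb
        simp [runB, stepB, stripA_skipBlock]
      · have hs : stripA_skipBlock (a :: b :: r) = stripA_skipBlock (b :: r) := by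
          simp [stripA_skipBlock, hab]
        rw [hs, ← ih]
        by_cases ha : a = '*'
        · subst ha
          have hb : b ≠ '/' := fun h => hab ⟨rfl, h⟩
          have e1 : runB .block ('*' :: b :: r) = runB .blockStar (b :: r) := by
            simp [runB, stepB]
          rw [e1, runB_blockStar b r hb]
        · simp [runB, stepB, ha]

theorem runB_slash (c : Char) (r : List Char) (h1 : c ≠ '/') (h2 : c ≠ '*') :
    runB .slash (c :: r) = '/' :: runB .normal (c :: r) := by
  by_cases hq : c = '"' ∨ c = '\'' <;> simp [runB, stepB, h1, h2, hq]

theorem mainA : ∀ (n : ℕ) (l : List Char), l.length ≤ n → ∀ (q : Char),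
    stripA_loop l true q = runB (.inStr q) l ∧ stripA_loop l false q = runB .normal l := by
  intro n
  induction n with
  | zero =>
    intro l hl q
    have : l = [] := List.length_eq_zero_iff.mp (Nat.le_zero.mp hl)
    subst this
    simp [stripA_loop, runB, flushB]
  | succ n ih =>
    intro l hl q
    cases l with
    | nil => simp [stripA_loop, runB, flushB]
    | cons ch rest =>
      have hrest : rest.length ≤ n := by simpa using Nat.succ_le_succ_iff.mp hl
      constructor
      · -- in-string state
        by_cases hbs : ch = '\\' ∧ rest ≠ []
        · obtain ⟨hb, hne⟩ := hbs
          subst hb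
          cases rest with
          | nil => exact absurd rfl hne
          | cons c2 r2 =>
            have h2 : r2.length ≤ n := Nat.le_trans (by simp) hrest
            simp [stripA_loop, runB, stepB, List.headI, (ih r2 h2 q).1]
        · rw [show stripA_loop (ch :: rest) true q =
              (if ch = q then ch :: stripA_loop rest false q else ch :: stripA_loop rest true q) by
              simp [stripA_loop, hbs]]
          by_cases hb : ch = '\\'
          · -- then rest = []
            have hre : rest = [] := by
              by_contra h; exact hbs ⟨hb, h⟩
            subst hre; subst hb
            by_cases hq : '\\' = q <;>
              simp [stripA_loop, runB, stepB, flushB, hq]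
          · by_cases hq : ch = q
            · have hb' : q ≠ '\\' := hq ▸ hb
              simp [runB, stepB, hb', hq, (ih rest hrest q).2]
            · simp [runB, stepB, hb, hq, (ih rest hrest q).1]
      · -- normal state
        by_cases hquote : ch = '"' ∨ ch = '\''
        · have hns : ch ≠ '/' := by rcases hquote with h | h <;> subst h <;> decide
          simp [stripA_loop, runB, stepB, hquote, (ih rest hrest ch).1]
        · by_cases hsl : ch = '/'
          · subst hsl
            cases rest with
            | nil =>
              simp [stripA_loop, runB, stepB, flushB]
            | cons c2 r2 =>
              have h2 : r2.length ≤ n := Nat.le_trans (by simp) hrest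
              by_cases hl2 : c2 = '/'
              · subst hl2
                have hsk : (stripA_skipLine r2).length ≤ n :=
                  Nat.le_trans (stripA_skipLine_length_le r2) (Nat.le_trans (by simp) hrest)
                simp [stripA_loop, runB, stepB, List.tail,
                      runB_line, (ih _ hsk q).2]
              · by_cases hb2 : c2 = '*'
                · subst hb2
                  have hsk : (stripA_skipBlock r2).length ≤ n :=
                    Nat.le_trans (stripA_skipBlock_length_le r2) (Nat.le_trans (by simp) hrest)
                  simp [stripA_loop, runB, stepB, hl2, List.tail,
                        runB_block, (ih _ hsk q).2]
                · have heq : stripA_loop ('/' :: c2 :: r2) false q =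
                      '/' :: stripA_loop (c2 :: r2) false q := by
                    simp [stripA_loop, hl2, hb2]
                  rw [heq, (ih (c2 :: r2) hrest q).2,
                      show runB .normal ('/' :: c2 :: r2) = runB .slash (c2 :: r2) by
                        simp [runB, stepB],
                      runB_slash c2 r2 hl2 hb2]
          · simp [stripA_loop, runB, stepB, hquote, hsl, (ih rest hrest q).2]

-- ===== VERDICT (by name: the statement is the Claim_ definition above) =====
theorem strip_jsonc_comments_spec : Claim_equal_strip_jsonc_comments := by
  intro text _
  unfold Spec_strip_jsonc_comments strip_jsonc_comments strip_jsonc_comments_alt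
  rw [show (let p := text.toList.foldl (fun p c => ((stepB p.1 c).1, p.2 ++ (stepB p.1 c).2)) (StB.normal, []);
        String.mk (p.2 ++ flushB p.1)) = String.mk ([] ++ runB .normal text.toList) from by
      simp only []; rw [foldl_runB]]
  simp [(mainA text.toList.length text.toList (Nat.le_refl _) ' ').2]
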